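-- pv_equiv track=rewrite | github.com/hthuwal/competitive-programming | lottery.py | extract_lottery_numbers
-- ===== SOURCE A (Python) =====
-- def extract_lottery_numbers(string, numbers_left):
--     """
--     All conditions are taken care of except "no duplicate numbers"
--     """
--
--     # ---------------------------------------------------------------------------- #
--     #                                   BASE CASE                                  #
--     # ---------------------------------------------------------------------------- #
--
--     # Base Case where we found one correct pick
--     if len(string) == 0 and numbers_left == 0:
--         return [""]
--
--     # Base Cases where we found wrong pick
--     bad_case1 = len(string) == 0 and numbers_left != 0
--     bad_case2 = len(string) != 0 and numbers_left == 0
--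
--     # Can't consider a 0 as a number anywher
--     # Not a base case but a wrong pick
--     bad_case3 = len(string) != 0 and string[0] == '0'
--
--     # if encounter any wrong pick, return empty result
--     if bad_case1 or bad_case2 or bad_case3:
--         return []
--
--     # ---------------------------------------------------------------------------- #
--     #                                RECURSIVE CASE                                #
--     # ---------------------------------------------------------------------------- #
--
--     # List to store all possible answers
--     ans = []
--
--     # --------------------- OPTION1: SELECT ONLY SINGLE DIGIT -------------------- #
--
--     # select only single digit, recursive call for the remaining string
--     values = extract_lottery_numbers(string[1:], numbers_left - 1)
--
--     # Append the selected digit to the answers of the remaining string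
--     ans = [string[0] + " " + value for value in values]
--
--     # ------------------------ OPTION2: SELECT TWO DIGITS ------------------------ #
--
--     # Opiton2 is valid only if there are ateleast 2 digits remaining in the string
--     # and the first digit is less than '6'
--     if len(string) >= 2 and string[0] < '6':
--
--         # select two digits, recursive call for the remaining string
--         values = extract_lottery_numbers(string[2:], numbers_left - 1)
--
--         # append the selected digits to the answers of the remaining string
--         ans += [string[:2] + " " + value for value in values]
--
--     # ---------------------------------------------------------------------------- #
--
--     return ans
-- ===== SOURCE B (Python) =====
-- def extract_lottery_numbers(string, numbers_left):
--     # Bottom-up sparse DP over suffixes instead of top-down recursion: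
--     # a forward pass computes, for every split point, the interval of token
--     # counts reachable by valid picks over the prefix; the backward pass keeps,
--     # per suffix, a dict  {numbers used in the suffix -> partial answers},
--     # pruned to keys that some prefix pick can complete to exactly numbers_left.
--     n = len(string)
--     K = numbers_left
--     # forward pass: lo[p]/hi[p] = least/greatest token count over valid picks
--     # covering string[:p]  (None = string[:p] cannot be covered at all)
--     lo = [None] * (n + 1)
--     hi = [None] * (n + 1)
--     lo[0] = hi[0] = 0
--     for p in range(1, n + 1):
--         cands = []
--         if lo[p - 1] is not None and string[p - 1] != '0':
--             cands.append((lo[p - 1] + 1, hi[p - 1] + 1))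
--         if p >= 2 and lo[p - 2] is not None and string[p - 2] != '0' and string[p - 2] < '6':
--             cands.append((lo[p - 2] + 1, hi[p - 2] + 1))
--         if cands:
--             lo[p] = min(a for a, _ in cands)
--             hi[p] = max(b for _, b in cands)
--     # backward pass over suffixes
--     row1, row2 = {0: [""]}, {}   # rows for the suffixes starting at pos+1 / pos+2
--     for pos in range(n - 1, -1, -1):
--         ch = string[pos]
--         cur = {}
--         if ch != '0' and lo[pos] is not None:
--             wlo, whi = K - hi[pos], K - lo[pos]
--             for k, vals in row1.items():
--                 if wlo <= k + 1 <= whi: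
--                     cur[k + 1] = [ch + " " + v for v in vals]
--             if pos + 2 <= n and ch < '6':
--                 for k, vals in row2.items():
--                     if wlo <= k + 1 <= whi:
--                         cur[k + 1] = cur.get(k + 1, []) + [ch + string[pos + 1] + " " + v for v in vals]
--         row2, row1 = row1, cur
--     return row1.get(K, [])
-- ===== Notes on version B (the rewrite author's own statement) =====
-- stated objective: alternative
-- what changed: Replaced A's top-down branching recursion with a bottom-up sparse DP over suffixes: a forward pass computes per split point the interval of reachable prefix token counts, and a backward pass keeps per suffix a dict {numbers used -> partial answers} pruned to keys some prefix pick can complete to exactly numbers_left.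
import Mathlib
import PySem

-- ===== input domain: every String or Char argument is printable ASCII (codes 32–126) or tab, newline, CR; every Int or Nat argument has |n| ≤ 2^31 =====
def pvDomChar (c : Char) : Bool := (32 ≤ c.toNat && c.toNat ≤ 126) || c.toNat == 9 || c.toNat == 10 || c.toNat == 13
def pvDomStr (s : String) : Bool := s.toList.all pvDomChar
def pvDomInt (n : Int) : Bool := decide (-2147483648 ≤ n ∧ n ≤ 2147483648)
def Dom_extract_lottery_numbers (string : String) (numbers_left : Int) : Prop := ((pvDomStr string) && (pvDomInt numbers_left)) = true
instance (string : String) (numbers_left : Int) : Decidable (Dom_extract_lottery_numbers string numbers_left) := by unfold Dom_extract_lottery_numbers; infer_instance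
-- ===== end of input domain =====

-- B replaces A's top-down branching recursion by a window-pruned bottom-up sparse DP over suffixes (alternative algorithm; identical return values).

-- ===== PORT A =====
-- A's recursion, transliterated over the character list of the string.
def pvGoA : List Char → Int → List String
  | [], k => if k = 0 then [""] else []
  | c :: rest, k =>
    if k = 0 then []
    else if c = '0' then []
    else
      -- option 1: single digit
      let ans := (pvGoA rest (k - 1)).map (fun v => String.mk (c :: ' ' :: v.toList))
      -- option 2: two digits (len(string) >= 2 and string[0] < '6')
      match rest with
      | c2 :: rest2 =>
        if c < '6' then
          ans ++ (pvGoA rest2 (k - 1)).map (fun v => String.mk (c :: c2 :: ' ' :: v.toList))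
        else ans
      | [] => ans

def extract_lottery_numbers (string : String) (numbers_left : Int) : List String :=
  pvGoA string.toList numbers_left

-- ===== PORT B =====
-- forward pass: pvWinPair s p = (window at split point p, window at split point p-1);
-- a window some (l, h) is the least/greatest token count over valid picks covering s[:p],
-- none = s[:p] cannot be covered at all (Source B's lo/hi arrays, kept as a rolling pair)
def pvWinPair (s : List Char) : Nat → Option (Int × Int) × Option (Int × Int)
  | 0 => (some (0, 0), none)
  | p + 1 =>
    let w1 := (pvWinPair s p).1
    let w2 := (pvWinPair s p).2
    let c1 : Option (Int × Int) :=
      match w1, s[p]? with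
      | some (l, h), some c => if c ≠ '0' then some (l + 1, h + 1) else none
      | _, _ => none
    let c2 : Option (Int × Int) :=
      match w2, s[p - 1]? with
      | some (l, h), some c => if c ≠ '0' ∧ c < '6' then some (l + 1, h + 1) else none
      | _, _ => none
    let w : Option (Int × Int) :=
      match c1, c2 with
      | some (l1, h1), some (l2, h2) => some (min l1 l2, max h1 h2)
      | some x, none => some x
      | none, some x => some x
      | none, none => none
    (w, w1)

-- backward pass, one position: build the row for the suffix at pos from the rows at pos+1 / pos+2
def pvStepRow (s : List Char) (K : Int) (pos : Nat)
    (row1 row2 : PySem.Dict Int (List String)) : PySem.Dict Int (List String) :=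
  let ch := s.getD pos ' '
  match (pvWinPair s pos).1 with
  | some (l, h) =>
    if ch ≠ '0' then
      let wlo := K - h
      let whi := K - l
      let cur1 := row1.items.foldl (fun d p =>
        if wlo ≤ p.1 + 1 ∧ p.1 + 1 ≤ whi then
          d.insert (p.1 + 1) (p.2.map (fun v => String.mk (ch :: ' ' :: v.toList)))
        else d) PySem.Dict.empty
      if pos + 2 ≤ s.length ∧ ch < '6' then
        row2.items.foldl (fun d p =>
          if wlo ≤ p.1 + 1 ∧ p.1 + 1 ≤ whi then
            d.modify (p.1 + 1) [] (· ++ p.2.map (fun v => String.mk (ch :: s.getD (pos + 1) ' ' :: ' ' :: v.toList)))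
          else d) cur1
      else cur1
    else PySem.Dict.empty
  | none => PySem.Dict.empty

-- rows for the suffix of length m (position s.length - m) and the one before it
def pvRowsB (s : List Char) (K : Int) : Nat → PySem.Dict Int (List String) × PySem.Dict Int (List String)
  | 0 => (PySem.Dict.mk [((0 : Int), [""])], PySem.Dict.empty)
  | m + 1 =>
    let pos := s.length - (m + 1)
    let rows := pvRowsB s K m
    (pvStepRow s K pos rows.1 rows.2, rows.1)

def extract_lottery_numbers_alt (string : String) (numbers_left : Int) : List String :=
  let s := string.toList
  ((pvRowsB s numbers_left s.length).1).getD numbers_left []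

-- ===== PRECONDITION & SPEC =====
def Spec_extract_lottery_numbers (string : String) (numbers_left : Int) (out : List String) : Prop := out = extract_lottery_numbers_alt string numbers_left
instance (string : String) (numbers_left : Int) (out : List String) : Decidable (Spec_extract_lottery_numbers string numbers_left out) := by unfold Spec_extract_lottery_numbers; infer_instance

-- ===== CLAIM (what is proved, stated in full; the proofs are below) =====
def Claim_equal_extract_lottery_numbers : Prop := ∀ (string : String) (numbers_left : Int), Dom_extract_lottery_numbers string numbers_left → Spec_extract_lottery_numbers string numbers_left (extract_lottery_numbers string numbers_left)

-- ===== LEMMAS AND PROOFS =====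

-- A's value is [] for a negative count
theorem pvGoA_neg (t : List Char) (k : Int) : k < 0 → pvGoA t k = [] := by
  induction t, k using pvGoA.induct with
  | case1 => intro hk; simp at hk
  | case2 k h1 => intro _; simp [pvGoA, h1]
  | case3 c rest => intro hk; simp at hk
  | case4 rest k h1 => intro _; simp [pvGoA, h1]
  | case5 c k h1 h2 c2 rest2 h3 ih ih2 =>
    intro hk
    have e1 := ih (by omega)
    have e2 := ih2 (by omega)
    simp [pvGoA, h1, h2, h3, e1, e2]
  | case6 c k h1 h2 c2 rest2 h3 ih =>
    intro hk
    have e1 := ih (by omega)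
    simp [pvGoA, h1, h2, h3, e1]
  | case7 c k h1 h2 ih =>
    intro hk
    have h4 : ¬ k - 1 = 0 := by omega
    simp [pvGoA, h1, h2, h4]

theorem pvGoA_zeroChar (rest : List Char) (n : Int) : pvGoA ('0' :: rest) n = [] := by
  rw [pvGoA]; split <;> simp

theorem pvGoA_zero (c : Char) (rest : List Char) : pvGoA (c :: rest) 0 = [] := by
  rw [pvGoA]; simp

-- unfolding of A's recursion at a nonzero count and a usable first character
theorem pvGoA_cons_eq (c : Char) (rest : List Char) (j : Int) (hj : j ≠ 0) (hc : c ≠ '0') :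
    pvGoA (c :: rest) j =
      (pvGoA rest (j - 1)).map (fun v => String.mk (c :: ' ' :: v.toList)) ++
      (match rest with
       | [] => []
       | c2 :: rest2 =>
         if c < '6' then (pvGoA rest2 (j - 1)).map (fun v => String.mk (c :: c2 :: ' ' :: v.toList)) else []) := by
  rw [pvGoA]
  rw [if_neg hj, if_neg hc]
  cases rest with
  | nil => simp
  | cons c2 rest2 => by_cases h6 : c < '6' <;> simp [h6]

-- the window interval only widens (shifted by one) along a valid single-digit pick
theorem pvWin_single (s : List Char) (p : Nat) (l h : Int) (c : Char)
    (hw : (pvWinPair s p).1 = some (l, h)) (hcell : s[p]? = some c) (hc : c ≠ '0') :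
    ∃ l' h', (pvWinPair s (p + 1)).1 = some (l', h') ∧ l' ≤ l + 1 ∧ h + 1 ≤ h' := by
  rcases hc2 : (match (pvWinPair s p).2, s[p - 1]? with
      | some (l, h), some c => if c ≠ '0' ∧ c < '6' then some (l + 1, h + 1) else none
      | _, _ => (none : Option (Int × Int))) with _ | ⟨l2, h2⟩
  · exact ⟨l + 1, h + 1, by simp [pvWinPair, hw, hcell, hc, hc2], by omega, by omega⟩
  · exact ⟨min (l + 1) l2, max (h + 1) h2, by simp [pvWinPair, hw, hcell, hc, hc2],
      min_le_left _ _, le_max_left _ _⟩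

-- and along a valid two-digit pick
theorem pvWin_double (s : List Char) (p : Nat) (l h : Int) (c : Char)
    (hw : (pvWinPair s p).1 = some (l, h)) (hcell : s[p]? = some c) (hc : c ≠ '0') (h6 : c < '6') :
    ∃ l' h', (pvWinPair s (p + 2)).1 = some (l', h') ∧ l' ≤ l + 1 ∧ h + 1 ≤ h' := by
  have hsnd : (pvWinPair s (p + 1)).2 = (pvWinPair s p).1 := by simp [pvWinPair]
  rcases hc1 : (match (pvWinPair s (p + 1)).1, s[p + 1]? with
      | some (l, h), some c => if c ≠ '0' then some (l + 1, h + 1) else none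
      | _, _ => (none : Option (Int × Int))) with _ | ⟨l1, h1⟩
  · refine ⟨l + 1, h + 1, ?_, by omega, by omega⟩
    show (pvWinPair s (p + 1 + 1)).1 = _
    conv_lhs => rw [pvWinPair]
    simp only [Nat.add_sub_cancel]
    simp only [hc1, hsnd, hw, hcell, hc, h6, ne_eq, not_false_iff, and_self, if_true]
  · refine ⟨min l1 (l + 1), max h1 (h + 1), ?_, min_le_right _ _, le_max_right _ _⟩
    show (pvWinPair s (p + 1 + 1)).1 = _
    conv_lhs => rw [pvWinPair]
    simp only [Nat.add_sub_cancel]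
    simp only [hc1, hsnd, hw, hcell, hc, h6, ne_eq, not_false_iff, and_self, if_true]

-- key j lies in the (completion) window at position pos
def pvInWin (s : List Char) (K : Int) (pos : Nat) (j : Int) : Prop :=
  ∃ l h, (pvWinPair s pos).1 = some (l, h) ∧ K - h ≤ j ∧ j ≤ K - l

-- the row invariant: in-window nonempty cells are stored, and stored cells are correct and nonempty
def pvRowSpec (s : List Char) (K : Int) (pos : Nat) (d : PySem.Dict Int (List String)) : Prop :=
  (∀ j : Int, pvInWin s K pos j → pvGoA (s.drop pos) j ≠ [] → d.get? j = some (pvGoA (s.drop pos) j))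
  ∧ (∀ (j : Int) (v : List String), d.get? j = some v → v = pvGoA (s.drop pos) j ∧ v ≠ [])
  ∧ d.keys.Nodup

theorem pvLookup_eq_get? (d : PySem.Dict Int (List String)) (k : Int) :
    List.lookup k d.items = d.get? k := by
  obtain ⟨items⟩ := d
  induction items with
  | nil => rfl
  | cons a tl ih =>
    rw [show (PySem.Dict.mk (a :: tl)).items = a :: tl from rfl, List.lookup_cons]
    rw [PySem.Dict.get?_mk_cons]
    by_cases h : a.1 = k
    · simp [h]
    · simp only [show (a.1 == k) = false by simpa using h, show (k == a.1) = false by simpa using (Ne.symm h)]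
      exact ih

theorem pvLookup_none (k : Int) (ps : List (Int × List String))
    (h : k ∉ ps.map Prod.fst) : List.lookup k ps = none := by
  induction ps with
  | nil => rfl
  | cons a tl ih =>
    simp only [List.map_cons, List.mem_cons, not_or] at h
    rw [List.lookup_cons, show (k == a.1) = false from by simpa using h.1]
    exact ih h.2

-- get? after the insert-fold over an item list with distinct keys
theorem pvFold1_get? (ps : List (Int × List String)) (wlo whi : Int)
    (F : List String → List String) (d : PySem.Dict Int (List String)) (j : Int)
    (hnd : (ps.map Prod.fst).Nodup) :
    (ps.foldl (fun d p =>
        if wlo ≤ p.1 + 1 ∧ p.1 + 1 ≤ whi then d.insert (p.1 + 1) (F p.2) else d) d).get? j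
      = if wlo ≤ j ∧ j ≤ whi then
          (match List.lookup (j - 1) ps with
           | some w => some (F w)
           | none => d.get? j)
        else d.get? j := by
  induction ps generalizing d with
  | nil => split <;> rfl
  | cons a tl ih =>
    obtain ⟨k, vs⟩ := a
    simp only [List.map_cons, List.nodup_cons] at hnd
    obtain ⟨hknotin, hndtl⟩ := hnd
    rw [List.foldl_cons, ih _ hndtl]
    by_cases hk : k = j - 1
    · have hj : j = k + 1 := by omega
      subst hj
      have hnone : List.lookup (k + 1 - 1) tl = none := by
        apply pvLookup_none
        simpa using hknotin
      by_cases hC : wlo ≤ k + 1 ∧ k + 1 ≤ whi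
      · simp only [if_pos hC, hnone, List.lookup_cons,
          show ((k + 1 - 1 : Int) == k) = true from by simp]
        rw [PySem.Dict.get?_insert, if_pos rfl]
      · simp only [if_neg hC]
    · have hne2 : ¬ (j = k + 1) := by omega
      have hbeq : ((j - 1 : Int) == k) = false := by
        simp only [beq_eq_false_iff_ne]; omega
      by_cases hC : wlo ≤ j ∧ j ≤ whi
      · simp only [if_pos hC, List.lookup_cons, hbeq]
        cases hl : List.lookup (j - 1) tl with
        | some w => rfl
        | none =>
          split
          · rfl
          · split
            · rw [PySem.Dict.get?_insert, if_neg hne2]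
            · rfl
      · simp only [if_neg hC]
        split
        · rw [PySem.Dict.get?_insert, if_neg hne2]
        · rfl

-- get? after the modify-fold over an item list with distinct keys
theorem pvFold2_get? (ps : List (Int × List String)) (wlo whi : Int)
    (G : List String → List String) (d : PySem.Dict Int (List String)) (j : Int)
    (hnd : (ps.map Prod.fst).Nodup) :
    (ps.foldl (fun d p =>
        if wlo ≤ p.1 + 1 ∧ p.1 + 1 ≤ whi then d.modify (p.1 + 1) [] (· ++ G p.2) else d) d).get? j
      = if wlo ≤ j ∧ j ≤ whi then
          (match List.lookup (j - 1) ps with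
           | some w => some (d.getD j [] ++ G w)
           | none => d.get? j)
        else d.get? j := by
  induction ps generalizing d with
  | nil => split <;> rfl
  | cons a tl ih =>
    obtain ⟨k, vs⟩ := a
    simp only [List.map_cons, List.nodup_cons] at hnd
    obtain ⟨hknotin, hndtl⟩ := hnd
    rw [List.foldl_cons, ih _ hndtl]
    by_cases hk : k = j - 1
    · have hj : j = k + 1 := by omega
      subst hj
      have hnone : List.lookup (k + 1 - 1) tl = none := by
        apply pvLookup_none
        simpa using hknotin
      by_cases hC : wlo ≤ k + 1 ∧ k + 1 ≤ whi
      · simp only [if_pos hC, hnone, List.lookup_cons,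
          show ((k + 1 - 1 : Int) == k) = true from by simp]
        rw [PySem.Dict.modify, PySem.Dict.get?_insert, if_pos rfl]
      · simp only [if_neg hC]
    · have hne2 : ¬ (j = k + 1) := by omega
      have hbeq : ((j - 1 : Int) == k) = false := by
        simp only [beq_eq_false_iff_ne]; omega
      by_cases hC : wlo ≤ j ∧ j ≤ whi
      · simp only [if_pos hC, List.lookup_cons, hbeq]
        cases hl : List.lookup (j - 1) tl with
        | some w =>
          split
          · by_cases hCk : wlo ≤ k + 1 ∧ k + 1 ≤ whi
            · rw [if_pos hCk, PySem.Dict.modify, PySem.Dict.getD_insert, if_neg hne2]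
            · rw [if_neg hCk]
          · rename_i heq
            exact absurd heq (by simp)
        | none =>
          split
          · rename_i heq
            exact absurd heq (by simp)
          · split
            · rw [PySem.Dict.modify, PySem.Dict.get?_insert, if_neg hne2]
            · rfl
      · simp only [if_neg hC]
        split
        · rw [PySem.Dict.modify, PySem.Dict.get?_insert, if_neg hne2]
        · rfl

theorem pvFold1_nodup (ps : List (Int × List String)) (wlo whi : Int)
    (F : List String → List String) (d : PySem.Dict Int (List String)) (hd : d.keys.Nodup) :
    ((ps.foldl (fun d p =>
        if wlo ≤ p.1 + 1 ∧ p.1 + 1 ≤ whi then d.insert (p.1 + 1) (F p.2) else d) d)).keys.Nodup := by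
  induction ps generalizing d with
  | nil => exact hd
  | cons a tl ih =>
    rw [List.foldl_cons]
    apply ih
    split
    · exact PySem.Dict.nodup_keys_insert _ _ _ hd
    · exact hd

theorem pvFold2_nodup (ps : List (Int × List String)) (wlo whi : Int)
    (G : List String → List String) (d : PySem.Dict Int (List String)) (hd : d.keys.Nodup) :
    ((ps.foldl (fun d p =>
        if wlo ≤ p.1 + 1 ∧ p.1 + 1 ≤ whi then d.modify (p.1 + 1) [] (· ++ G p.2) else d) d)).keys.Nodup := by
  induction ps generalizing d with
  | nil => exact hd
  | cons a tl ih =>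
    rw [List.foldl_cons]
    apply ih
    split
    · exact PySem.Dict.nodup_keys_insert _ _ _ hd
    · exact hd

-- one backward step preserves the row invariant
theorem pvStepRow_spec (s : List Char) (K : Int) (pos : Nat) (hpos : pos < s.length)
    (row1 row2 : PySem.Dict Int (List String))
    (h1 : pvRowSpec s K (pos + 1) row1)
    (h2 : pos + 2 ≤ s.length → pvRowSpec s K (pos + 2) row2) :
    pvRowSpec s K pos (pvStepRow s K pos row1 row2) := by
  have hcell : s[pos]? = some s[pos] := List.getElem?_eq_getElem hpos
  have hch : s.getD pos ' ' = s[pos] := List.getD_eq_getElem s ' ' hpos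
  have hdrop : s.drop pos = s[pos] :: s.drop (pos + 1) := List.drop_eq_getElem_cons hpos
  cases hwv : (pvWinPair s pos).1 with
  | none =>
    have hD : pvStepRow s K pos row1 row2 = PySem.Dict.empty := by
      simp only [pvStepRow, hwv]
    rw [hD]
    refine ⟨?_, ?_, ?_⟩
    · intro j hin _
      obtain ⟨l, h, heq, -, -⟩ := hin
      rw [hwv] at heq
      cases heq
    · intro j v hv
      exact absurd hv (by simp [PySem.Dict.get?, PySem.Dict.empty])
    · show (List.map (fun x => x.1) (PySem.Dict.empty : PySem.Dict Int (List String)).items).Nodup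
      simp [PySem.Dict.empty]
  | some lh =>
    obtain ⟨l, h⟩ := lh
    by_cases hc0 : ¬ s.getD pos ' ' = '0'
    case neg =>
      rw [not_not] at hc0
      have hD : pvStepRow s K pos row1 row2 = PySem.Dict.empty := by
        simp only [pvStepRow, hwv]
        rw [if_neg (by simpa using hc0)]
      rw [hD]
      refine ⟨?_, ?_, ?_⟩
      · intro j hin hne
        rw [hdrop, ← hch, hc0] at hne
        exact absurd (pvGoA_zeroChar _ j) hne
      · intro j v hv
        exact absurd hv (by simp [PySem.Dict.get?, PySem.Dict.empty])
      · show (List.map (fun x => x.1) (PySem.Dict.empty : PySem.Dict Int (List String)).items).Nodup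
        simp [PySem.Dict.empty]
    case pos =>
      obtain ⟨h1in, h1cor, h1nd⟩ := h1
      have h1nd' : (List.map Prod.fst row1.items).Nodup := by
        simpa [PySem.Dict.keys] using h1nd
      have hc0' : ¬ s[pos] = '0' := by rwa [hch] at hc0
      have hW2 : ∀ j : Int, K - h ≤ j → j ≤ K - l → pvInWin s K (pos + 1) (j - 1) := by
        intro j hj1 hj2
        obtain ⟨l', h', heq, hl', hh'⟩ := pvWin_single s pos l h s[pos] hwv hcell hc0'
        exact ⟨l', h', heq, by omega, by omega⟩
      -- shorthands for the two recursive values feeding cell j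
      by_cases hg : pos + 2 ≤ s.length ∧ s.getD pos ' ' < '6'
      case neg =>
        -- only the single-digit fold
        have hD : pvStepRow s K pos row1 row2 =
            row1.items.foldl (fun d p =>
              if K - h ≤ p.1 + 1 ∧ p.1 + 1 ≤ K - l then
                d.insert (p.1 + 1) (p.2.map (fun v => String.mk (s.getD pos ' ' :: ' ' :: v.toList)))
              else d) PySem.Dict.empty := by
          simp only [pvStepRow, hwv]
          rw [if_pos hc0, if_neg hg]
        rw [hD]
        -- the two-digit option contributes nothing here
        have hD2 : ∀ j : Int, j ≠ 0 → pvGoA (s.drop pos) j =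
            (pvGoA (s.drop (pos + 1)) (j - 1)).map (fun v => String.mk (s.getD pos ' ' :: ' ' :: v.toList)) := by
          intro j hj0
          rw [hdrop, pvGoA_cons_eq _ _ _ hj0 hc0', hch]
          rcases Nat.lt_or_ge (pos + 1) s.length with hlt | hge
          · rw [List.drop_eq_getElem_cons hlt]
            have h6 : ¬ s[pos] < '6' := by
              intro hx
              exact hg ⟨by omega, by rwa [hch]⟩
            simp only [if_neg h6]
            simp
          · rw [List.drop_eq_nil_of_le hge]
            simp
        refine ⟨?_, ?_, ?_⟩
        · intro j hin hne
          obtain ⟨l0, h0, heq0, hb1, hb2⟩ := hin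
          rw [hwv] at heq0
          obtain ⟨rfl, rfl⟩ : l0 = l ∧ h0 = h := by simpa using heq0.symm
          have hj0 : j ≠ 0 := by
            intro hj
            subst hj
            rw [hdrop] at hne
            exact hne (pvGoA_zero _ _)
          have hval := hD2 j hj0
          have hg1 : pvGoA (s.drop (pos + 1)) (j - 1) ≠ [] := by
            intro hg1
            rw [hval, hg1] at hne
            exact hne rfl
          rw [pvFold1_get? _ _ _ _ _ _ h1nd', pvLookup_eq_get?,
            h1in _ (hW2 j hb1 hb2) hg1, if_pos ⟨hb1, hb2⟩, hval]
        · intro j v hv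
          rw [pvFold1_get? _ _ _ _ _ _ h1nd', pvLookup_eq_get?] at hv
          by_cases hP : K - h ≤ j ∧ j ≤ K - l
          · rw [if_pos hP] at hv
            cases hx : row1.get? (j - 1) with
            | none => rw [hx] at hv; exact absurd hv (by simp [PySem.Dict.get?, PySem.Dict.empty])
            | some w =>
              rw [hx] at hv
              obtain ⟨hw, hwne⟩ := h1cor _ _ hx
              have hj0 : j ≠ 0 := by
                intro hj
                subst hj
                exact hwne (hw.trans (pvGoA_neg _ _ (by omega)))
              cases hv
              rw [hD2 j hj0, hw]
              exact ⟨rfl, by simpa [hw] using hwne⟩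
          · rw [if_neg hP] at hv
            exact absurd hv (by simp [PySem.Dict.get?, PySem.Dict.empty])
        · exact pvFold1_nodup _ _ _ _ _ (by simp [PySem.Dict.empty, PySem.Dict.keys])
      case pos =>
        have hpos1 : pos + 1 < s.length := by omega
        have hcell2 : s[pos + 1]? = some s[pos + 1] := List.getElem?_eq_getElem hpos1
        have hch2 : s.getD (pos + 1) ' ' = s[pos + 1] := List.getD_eq_getElem s ' ' hpos1
        have hdrop2 : s.drop (pos + 1) = s[pos + 1] :: s.drop (pos + 2) :=
          List.drop_eq_getElem_cons hpos1
        obtain ⟨h2in, h2cor, h2nd⟩ := h2 hg.1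
        have h2nd' : (List.map Prod.fst row2.items).Nodup := by
          simpa [PySem.Dict.keys] using h2nd
        have h6 : s[pos] < '6' := by have h6' := hg.2; rwa [hch] at h6'
        have hW3 : ∀ j : Int, K - h ≤ j → j ≤ K - l → pvInWin s K (pos + 2) (j - 1) := by
          intro j hj1 hj2
          obtain ⟨l', h', heq, hl', hh'⟩ := pvWin_double s pos l h s[pos] hwv hcell hc0' h6
          exact ⟨l', h', heq, by omega, by omega⟩
        have hD : pvStepRow s K pos row1 row2 =
            row2.items.foldl (fun d p =>
              if K - h ≤ p.1 + 1 ∧ p.1 + 1 ≤ K - l then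
                d.modify (p.1 + 1) [] (· ++ p.2.map (fun v => String.mk (s.getD pos ' ' :: s.getD (pos + 1) ' ' :: ' ' :: v.toList)))
              else d)
            (row1.items.foldl (fun d p =>
              if K - h ≤ p.1 + 1 ∧ p.1 + 1 ≤ K - l then
                d.insert (p.1 + 1) (p.2.map (fun v => String.mk (s.getD pos ' ' :: ' ' :: v.toList)))
              else d) PySem.Dict.empty) := by
          simp only [pvStepRow, hwv]
          rw [if_pos hc0, if_pos hg]
        -- the cell value splits into the single-digit and two-digit contributions
        have hD2 : ∀ j : Int, j ≠ 0 → pvGoA (s.drop pos) j =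
            (pvGoA (s.drop (pos + 1)) (j - 1)).map (fun v => String.mk (s.getD pos ' ' :: ' ' :: v.toList)) ++
            (pvGoA (s.drop (pos + 2)) (j - 1)).map (fun v => String.mk (s.getD pos ' ' :: s.getD (pos + 1) ' ' :: ' ' :: v.toList)) := by
          intro j hj0
          rw [hdrop, pvGoA_cons_eq _ _ _ hj0 hc0', hch, hch2, hdrop2]
          simp only [if_pos h6]
        rw [hD]
        set d1 := row1.items.foldl (fun d p =>
            if K - h ≤ p.1 + 1 ∧ p.1 + 1 ≤ K - l then
              d.insert (p.1 + 1) (p.2.map (fun v => String.mk (s.getD pos ' ' :: ' ' :: v.toList)))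
            else d) PySem.Dict.empty with hd1
        have e1get : ∀ j : Int, d1.get? j =
            if K - h ≤ j ∧ j ≤ K - l then
              (match row1.get? (j - 1) with
               | some w => some (w.map (fun v => String.mk (s.getD pos ' ' :: ' ' :: v.toList)))
               | none => none)
            else none := by
          intro j
          rw [hd1, pvFold1_get? _ _ _ _ _ _ h1nd', pvLookup_eq_get?]
          cases row1.get? (j - 1) <;> split <;> simp [PySem.Dict.get?, PySem.Dict.empty]
        refine ⟨?_, ?_, ?_⟩
        · intro j hin hne
          obtain ⟨l0, h0, heq0, hb1, hb2⟩ := hin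
          rw [hwv] at heq0
          obtain ⟨rfl, rfl⟩ : l0 = l ∧ h0 = h := by simpa using heq0.symm
          have hj0 : j ≠ 0 := by
            intro hj
            subst hj
            rw [hdrop] at hne
            exact hne (pvGoA_zero _ _)
          have hval := hD2 j hj0
          have hrow1some : pvGoA (s.drop (pos + 1)) (j - 1) ≠ [] →
              row1.get? (j - 1) = some (pvGoA (s.drop (pos + 1)) (j - 1)) :=
            fun hne1 => h1in _ (hW2 j hb1 hb2) hne1
          have hrow1none : pvGoA (s.drop (pos + 1)) (j - 1) = [] → row1.get? (j - 1) = none := by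
            intro he
            cases hx : row1.get? (j - 1) with
            | none => rfl
            | some v => exact absurd ((h1cor _ _ hx).1.trans he) (h1cor _ _ hx).2
          have hrow2some : pvGoA (s.drop (pos + 2)) (j - 1) ≠ [] →
              row2.get? (j - 1) = some (pvGoA (s.drop (pos + 2)) (j - 1)) :=
            fun hne2 => h2in _ (hW3 j hb1 hb2) hne2
          have hrow2none : pvGoA (s.drop (pos + 2)) (j - 1) = [] → row2.get? (j - 1) = none := by
            intro he
            cases hx : row2.get? (j - 1) with
            | none => rfl
            | some v => exact absurd ((h2cor _ _ hx).1.trans he) (h2cor _ _ hx).2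
          rw [pvFold2_get? _ _ _ _ _ _ h2nd', pvLookup_eq_get?, if_pos ⟨hb1, hb2⟩]
          by_cases hg2e : pvGoA (s.drop (pos + 2)) (j - 1) = []
          · have hg1e : pvGoA (s.drop (pos + 1)) (j - 1) ≠ [] := by
              intro he
              rw [hval, he, hg2e] at hne
              exact hne rfl
            rw [hrow2none hg2e]
            simp only [e1get, if_pos (And.intro hb1 hb2), hrow1some hg1e]
            rw [hval, hg2e]
            simp
          · rw [hrow2some hg2e]
            simp only [PySem.Dict.getD_eq_get?_getD, e1get, if_pos (And.intro hb1 hb2)]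
            by_cases hg1e : pvGoA (s.drop (pos + 1)) (j - 1) = []
            · rw [hrow1none hg1e, hval, hg1e]
              simp
            · rw [hrow1some hg1e, hval]
              simp
        · intro j v hv
          rw [pvFold2_get? _ _ _ _ _ _ h2nd', pvLookup_eq_get?] at hv
          by_cases hP : K - h ≤ j ∧ j ≤ K - l
          · rw [if_pos hP] at hv
            have hrow1empty : row1.get? (j - 1) = none → pvGoA (s.drop (pos + 1)) (j - 1) = [] := by
              intro hx
              by_contra he
              rw [h1in _ (hW2 j hP.1 hP.2) he] at hx
              cases hx
            have hrow2empty : row2.get? (j - 1) = none → pvGoA (s.drop (pos + 2)) (j - 1) = [] := by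
              intro hx
              by_contra he
              rw [h2in _ (hW3 j hP.1 hP.2) he] at hx
              cases hx
            cases hx2 : row2.get? (j - 1) with
            | some w2 =>
              simp only [hx2] at hv
              obtain ⟨hw2, hw2ne⟩ := h2cor _ _ hx2
              have hj0 : j ≠ 0 := by
                intro hj
                subst hj
                exact hw2ne (hw2.trans (pvGoA_neg _ _ (by omega)))
              cases hx1 : row1.get? (j - 1) with
              | some w1 =>
                obtain ⟨hw1, hw1ne⟩ := h1cor _ _ hx1
                simp only [PySem.Dict.getD_eq_get?_getD, e1get, if_pos hP, hx1] at hv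
                cases hv
                rw [hD2 j hj0, hw1, hw2]
                refine ⟨rfl, ?_⟩
                intro hnil
                exact (hw1 ▸ hw1ne) (List.map_eq_nil_iff.mp (List.append_eq_nil_iff.mp hnil).1)
              | none =>
                simp only [PySem.Dict.getD_eq_get?_getD, e1get, if_pos hP, hx1] at hv
                cases hv
                rw [hD2 j hj0, hrow1empty hx1, hw2]
                refine ⟨by simp, ?_⟩
                intro hnil
                exact (hw2 ▸ hw2ne) (List.map_eq_nil_iff.mp (List.append_eq_nil_iff.mp hnil).2)
            | none =>
              simp only [hx2, e1get, if_pos hP] at hv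
              cases hx1 : row1.get? (j - 1) with
              | some w1 =>
                obtain ⟨hw1, hw1ne⟩ := h1cor _ _ hx1
                simp only [hx1] at hv
                cases hv
                have hj0 : j ≠ 0 := by
                  intro hj
                  subst hj
                  exact hw1ne (hw1.trans (pvGoA_neg _ _ (by omega)))
                rw [hD2 j hj0, hw1, hrow2empty hx2]
                refine ⟨by simp, ?_⟩
                intro hnil
                exact (hw1 ▸ hw1ne) (List.map_eq_nil_iff.mp hnil)
              | none =>
                simp only [hx1] at hv
                cases hv
          · rw [if_neg hP] at hv
            simp only [e1get, if_neg hP] at hv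
            cases hv
        · apply pvFold2_nodup
          rw [hd1]
          exact pvFold1_nodup _ _ _ _ _ (by simp [PySem.Dict.empty, PySem.Dict.keys])

theorem pvRowsB_spec (s : List Char) (K : Int) :
    ∀ m : Nat, m ≤ s.length →
      pvRowSpec s K (s.length - m) (pvRowsB s K m).1 ∧
      (1 ≤ m → pvRowSpec s K (s.length - m + 1) (pvRowsB s K m).2) := by
  intro m
  induction m with
  | zero =>
    intro _
    refine ⟨⟨?_, ?_, ?_⟩, fun h => absurd h (by omega)⟩
    · intro j hin hne
      rw [Nat.sub_zero, List.drop_length] at hne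
      have hj : j = 0 := by
        by_contra hj0
        exact hne (by rw [pvGoA]; exact if_neg hj0)
      subst hj
      rw [show (pvRowsB s K 0).1 = PySem.Dict.mk [((0 : Int), [""])] from rfl]
      rw [PySem.Dict.get?_mk_cons]
      rw [Nat.sub_zero, List.drop_length]
      simp [pvGoA]
    · intro j v hv
      rw [show (pvRowsB s K 0).1 = PySem.Dict.mk [((0 : Int), [""])] from rfl] at hv
      rw [PySem.Dict.get?_mk_cons] at hv
      by_cases hj : (0 : Int) = j
      · subst hj
        simp only [BEq.rfl, if_pos] at hv
        cases hv
        rw [Nat.sub_zero, List.drop_length]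
        simp [pvGoA]
      · rw [if_neg (by simpa using hj)] at hv
        exact absurd hv (by simp [PySem.Dict.get?])
    · show (List.map (fun x => x.1) (PySem.Dict.mk [((0 : Int), [""])]).items).Nodup
      simp
  | succ m ih =>
    intro hm1
    have hm : m ≤ s.length := by omega
    obtain ⟨ih1, ih2⟩ := ih hm
    have hpos : s.length - (m + 1) < s.length := by omega
    constructor
    · show pvRowSpec s K (s.length - (m + 1))
        (pvStepRow s K (s.length - (m + 1)) (pvRowsB s K m).1 (pvRowsB s K m).2)
      apply pvStepRow_spec s K _ hpos
      · rw [show s.length - (m + 1) + 1 = s.length - m from by omega]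
        exact ih1
      · intro hle
        rw [show s.length - (m + 1) + 2 = s.length - m + 1 from by omega]
        exact ih2 (by omega)
    · intro _
      rw [show s.length - (m + 1) + 1 = s.length - m from by omega]
      exact ih1

-- ===== VERDICT (by name: the statement is the Claim_ definition above) =====
theorem extract_lottery_numbers_spec : Claim_equal_extract_lottery_numbers := by
  intro string k _dom
  unfold Spec_extract_lottery_numbers extract_lottery_numbers extract_lottery_numbers_alt
  simp only
  have hspec := (pvRowsB_spec string.toList k string.toList.length (le_refl _)).1
  rw [Nat.sub_self] at hspec
  unfold pvRowSpec at hspec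
  simp only [List.drop_zero] at hspec
  obtain ⟨hin, hcor, -⟩ := hspec
  rw [PySem.Dict.getD_eq_get?_getD]
  by_cases hne : pvGoA string.toList k = []
  · cases hv : ((pvRowsB string.toList k string.toList.length).1).get? k with
    | none => simpa using hne
    | some v =>
      obtain ⟨hveq, hvne⟩ := hcor k v hv
      exact absurd (hveq.trans hne) hvne
  · rw [hin k ⟨0, 0, rfl, by omega, by omega⟩ hne]
    rfl
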